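-- pv_equiv track=rewrite | github.com/pypi-data/pypi-mirror-114 | packages/vdr/vdr-2.0.4.tar.gz/vdr-2.0.4/vdr/sentences.py | DAP
-- ===== SOURCE A (Python) =====
-- def checksum(sentence):
--     checksum = 0
--     for el in sentence[1:]:
--         checksum ^= ord(el)
--     return "*" + str(format(checksum, 'x'))
--
-- def DAP(id, load_rate, consumption, power, rpm, nox_emission, temperature):
--     """Diesel Alternator Parameters"""
--     fields = (
--         ("Alternator ID", id),
--         ("Load rate", load_rate),
--         ("Consumption", consumption),
--         ("Power", power),
--         ("RPM", rpm),
--         ("NOx emission", nox_emission),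
--         ("Temperature", temperature)
--     )
--
--     sentence = "$PFDAP,"
--     for i in fields:
--         sentence += str(i[1]) + ","
--
--     return sentence + checksum(sentence) + "\t\n"
-- ===== SOURCE B (Python) =====
-- def DAP(id, load_rate, consumption, power, rpm, nox_emission, temperature):
--     """Diesel Alternator Parameters"""
--     xor = 0
--     for ch in "PFDAP,":
--         xor ^= ord(ch)
--     sentence = "$PFDAP,"
--     for value in (id, load_rate, consumption, power, rpm, nox_emission, temperature):
--         part = str(value) + ","
--         sentence += part
--         for ch in part:
--             xor ^= ord(ch)
--     return sentence + "*" + format(xor, "x") + "\t\n"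
-- ===== Notes on version B (the rewrite author's own statement) =====
-- stated objective: alternative
-- what changed: B folds the XOR checksum into the sentence-building loop (one pass over each field string as it is produced) instead of A's build-then-rescan of the finished sentence via a separate checksum helper.
import Mathlib
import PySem

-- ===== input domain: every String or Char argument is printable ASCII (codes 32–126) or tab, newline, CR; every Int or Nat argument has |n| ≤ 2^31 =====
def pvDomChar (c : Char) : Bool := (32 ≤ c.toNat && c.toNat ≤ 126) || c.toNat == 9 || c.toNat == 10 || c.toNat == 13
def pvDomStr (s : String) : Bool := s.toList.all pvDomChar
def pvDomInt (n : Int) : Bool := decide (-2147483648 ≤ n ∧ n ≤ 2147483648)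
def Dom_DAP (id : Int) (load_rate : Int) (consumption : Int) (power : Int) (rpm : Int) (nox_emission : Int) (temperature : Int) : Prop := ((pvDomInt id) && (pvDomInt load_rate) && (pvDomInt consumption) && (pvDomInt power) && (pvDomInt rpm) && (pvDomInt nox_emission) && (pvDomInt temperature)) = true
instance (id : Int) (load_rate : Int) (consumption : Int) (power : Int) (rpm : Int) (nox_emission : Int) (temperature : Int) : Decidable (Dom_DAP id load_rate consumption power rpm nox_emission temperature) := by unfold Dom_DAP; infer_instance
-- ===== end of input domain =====

-- B folds the XOR checksum into the sentence-building loop (one pass per field string) instead of A's build-then-rescan; same output, same cost.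

-- ===== PORT A =====
-- format(n,'x') for n ≥ 0 (lowercase hex, no prefix); hand-ported, exact for the nonnegative values these programs format
def pvHexDigit (d : Nat) : Char := if d < 10 then Char.ofNat (48 + d) else Char.ofNat (87 + d)

def pvHexChars (n : Nat) : List Char :=
  if hn : n = 0 then [] else pvHexChars (n / 16) ++ [pvHexDigit (n % 16)]
decreasing_by exact Nat.div_lt_self (Nat.pos_of_ne_zero hn) (by norm_num)

def pvHexStr (n : Nat) : String := if n = 0 then "0" else String.ofList (pvHexChars n)

-- helper 'checksum' of A: XOR the ords of sentence[1:], then "*" + hex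
def pyChecksum (sentence : String) : String :=
  "*" ++ pvHexStr (List.foldl (fun acc el => acc ^^^ el.toNat) 0 (sentence.toList.drop 1))

def DAP (id : Int) (load_rate : Int) (consumption : Int) (power : Int) (rpm : Int) (nox_emission : Int) (temperature : Int) : String :=
  let fields : List (String × Int) :=
    [("Alternator ID", id), ("Load rate", load_rate), ("Consumption", consumption),
     ("Power", power), ("RPM", rpm), ("NOx emission", nox_emission), ("Temperature", temperature)]
  let sentence := List.foldl (fun s i => s ++ PySem.Int.toStr i.2 ++ ",") "$PFDAP," fields
  sentence ++ pyChecksum sentence ++ "\t\n"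

-- ===== PORT B =====
def DAP_alt (id : Int) (load_rate : Int) (consumption : Int) (power : Int) (rpm : Int) (nox_emission : Int) (temperature : Int) : String :=
  let xor0 := List.foldl (fun a c => a ^^^ c.toNat) 0 "PFDAP,".toList
  let r := List.foldl
    (fun (st : String × Nat) (v : Int) =>
      let part := PySem.Int.toStr v ++ ","
      (st.1 ++ part, List.foldl (fun a c => a ^^^ c.toNat) st.2 part.toList))
    ("$PFDAP,", xor0)
    [id, load_rate, consumption, power, rpm, nox_emission, temperature]
  r.1 ++ "*" ++ pvHexStr r.2 ++ "\t\n"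

-- ===== PRECONDITION & SPEC =====
def Spec_DAP (id : Int) (load_rate : Int) (consumption : Int) (power : Int) (rpm : Int) (nox_emission : Int) (temperature : Int) (out : String) : Prop := out = DAP_alt id load_rate consumption power rpm nox_emission temperature
instance (id : Int) (load_rate : Int) (consumption : Int) (power : Int) (rpm : Int) (nox_emission : Int) (temperature : Int) (out : String) : Decidable (Spec_DAP id load_rate consumption power rpm nox_emission temperature out) := by unfold Spec_DAP; infer_instance

-- ===== CLAIM (what is proved, stated in full; the proofs are below) =====
def Claim_equal_DAP : Prop := ∀ (id : Int) (load_rate : Int) (consumption : Int) (power : Int) (rpm : Int) (nox_emission : Int) (temperature : Int), Dom_DAP id load_rate consumption power rpm nox_emission temperature → Spec_DAP id load_rate consumption power rpm nox_emission temperature (DAP id load_rate consumption power rpm nox_emission temperature)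

-- ===== LEMMAS AND PROOFS =====

-- ===== VERDICT (by name: the statement is the Claim_ definition above) =====
theorem DAP_spec : Claim_equal_DAP := by
  intro id load_rate consumption power rpm nox_emission temperature _
  unfold Spec_DAP DAP DAP_alt pyChecksum
  simp [List.foldl, String.toList_append, List.foldl_append, String.append_assoc]
  rw [← String.append_assoc]
  congr 1
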